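-- pv_equiv track=rewrite | github.com/hallengray/rag-forge | packages/core/src/rag_forge_core/chunking/llm_driven.py | _apply_boundaries
-- ===== SOURCE A (Python) =====
-- def _apply_boundaries(sentences: list[str], boundaries: list[int]) -> list[list[str]]:
--     """Split sentences into groups at the given boundary indices."""
--     if not boundaries:
--         return [sentences]
--     groups: list[list[str]] = []
--     prev = 0
--     for boundary in boundaries:
--         groups.append(sentences[prev:boundary])
--         prev = boundary
--     groups.append(sentences[prev:])
--     return [g for g in groups if g]
-- ===== SOURCE B (Python) =====
-- def _apply_boundaries(sentences: list[str], boundaries: list[int]) -> list[list[str]]: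
--     """Split sentences into groups at the given boundary indices."""
--     if not boundaries:
--         return [sentences]
--
--     def go(prev: int, bs: list[int]) -> list[list[str]]:
--         if not bs:
--             tail = sentences[prev:]
--             return [tail] if tail else []
--         head = sentences[prev:bs[0]]
--         rest = go(bs[0], bs[1:])
--         return [head] + rest if head else rest
--
--     return go(0, boundaries)
-- ===== Notes on version B (the rewrite author's own statement) =====
-- stated objective: alternative
-- what changed: Replaces the prev-tracking loop that materialises a groups list and then filters it in a second comprehension pass with a recursion over the boundary list that builds the result back-to-front and drops empty groups as they arise (no intermediate list, no filtering pass).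
import Mathlib
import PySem

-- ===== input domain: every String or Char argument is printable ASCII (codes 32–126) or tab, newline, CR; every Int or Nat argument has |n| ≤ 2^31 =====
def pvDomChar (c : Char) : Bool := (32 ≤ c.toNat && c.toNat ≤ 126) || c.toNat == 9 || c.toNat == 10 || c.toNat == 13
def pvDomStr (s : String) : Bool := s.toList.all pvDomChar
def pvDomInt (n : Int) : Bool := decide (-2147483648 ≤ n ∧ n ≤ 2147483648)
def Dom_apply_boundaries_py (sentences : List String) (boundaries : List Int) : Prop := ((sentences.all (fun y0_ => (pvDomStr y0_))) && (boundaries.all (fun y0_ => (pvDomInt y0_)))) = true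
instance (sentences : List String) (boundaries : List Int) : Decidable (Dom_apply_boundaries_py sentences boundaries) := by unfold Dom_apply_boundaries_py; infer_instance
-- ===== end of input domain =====

-- B replaces A's loop + staged filter with a recursion over the boundaries that drops empty groups as it builds; objective: alternative.

-- ===== PORT A =====
def apply_boundaries_py (sentences : List String) (boundaries : List Int) : List (List String) :=
  if boundaries = [] then [sentences]
  else
    let st := boundaries.foldl
      (fun (st : List (List String) × Int) boundary =>
        (st.1 ++ [PySem.List.slice sentences (some st.2) (some boundary)], boundary))
      ([], 0)
    let groups := st.1 ++ [PySem.List.slice sentences (some st.2) none]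
    groups.filter (fun g => !g.isEmpty)

-- ===== PORT B =====
def apply_boundaries_go (sentences : List String) (prev : Int) : List Int → List (List String)
  | [] =>
      let tail := PySem.List.slice sentences (some prev) none
      if tail.isEmpty then [] else [tail]
  | b :: bs =>
      let head := PySem.List.slice sentences (some prev) (some b)
      let rest := apply_boundaries_go sentences b bs
      if head.isEmpty then rest else head :: rest

def apply_boundaries_py_alt (sentences : List String) (boundaries : List Int) : List (List String) :=
  if boundaries = [] then [sentences]
  else apply_boundaries_go sentences 0 boundaries

-- ===== PRECONDITION & SPEC =====
def Spec_apply_boundaries_py (sentences : List String) (boundaries : List Int) (out : List (List String)) : Prop := out = apply_boundaries_py_alt sentences boundaries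
instance (sentences : List String) (boundaries : List Int) (out : List (List String)) : Decidable (Spec_apply_boundaries_py sentences boundaries out) := by unfold Spec_apply_boundaries_py; infer_instance

-- ===== CLAIM (what is proved, stated in full; the proofs are below) =====
def Claim_equal_apply_boundaries_py : Prop := ∀ (sentences : List String) (boundaries : List Int), Dom_apply_boundaries_py sentences boundaries → Spec_apply_boundaries_py sentences boundaries (apply_boundaries_py sentences boundaries)

-- ===== LEMMAS AND PROOFS =====

-- Loop invariant: filtering A's fold result (plus the trailing tail slice) equals the
-- already-filtered accumulator followed by B's recursion from the same prev.
theorem fold_filter_eq_go (sentences : List String) (bs : List Int) (prev : Int)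
    (acc : List (List String)) :
    ((bs.foldl
        (fun (st : List (List String) × Int) boundary =>
          (st.1 ++ [PySem.List.slice sentences (some st.2) (some boundary)], boundary))
        (acc, prev)).1 ++
      [PySem.List.slice sentences
        (some (bs.foldl
          (fun (st : List (List String) × Int) boundary =>
            (st.1 ++ [PySem.List.slice sentences (some st.2) (some boundary)], boundary))
          (acc, prev)).2) none]).filter (fun g => !g.isEmpty) =
    acc.filter (fun g => !g.isEmpty) ++ apply_boundaries_go sentences prev bs := by
  induction bs generalizing prev acc with
  | nil =>
      simp only [List.foldl_nil, apply_boundaries_go, List.filter_append, List.filter_cons,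
        List.filter_nil]
      cases h : (PySem.List.slice sentences (some prev) none).isEmpty <;> simp [h]
  | cons b rest ih =>
      simp only [List.foldl_cons, apply_boundaries_go]
      rw [ih]
      simp only [List.filter_append, List.filter_cons, List.filter_nil]
      cases h : (PySem.List.slice sentences (some prev) (some b)).isEmpty <;> simp [h]

theorem apply_boundaries_py_eq_alt (sentences : List String) (boundaries : List Int) :
    apply_boundaries_py sentences boundaries = apply_boundaries_py_alt sentences boundaries := by
  by_cases h : boundaries = []
  · simp [apply_boundaries_py, apply_boundaries_py_alt, h]
  · simp only [apply_boundaries_py, apply_boundaries_py_alt, if_neg h]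
    have := fold_filter_eq_go sentences boundaries 0 []
    simpa using this

-- ===== VERDICT (by name: the statement is the Claim_ definition above) =====
theorem apply_boundaries_py_spec : Claim_equal_apply_boundaries_py := by
  intro sentences boundaries _
  unfold Spec_apply_boundaries_py
  exact apply_boundaries_py_eq_alt sentences boundaries
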